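-- pv_equiv track=rewrite | github.com/PhotonicGluon/Intro-To-Competitive-Programming | Course Files/02 - Problem Solving Paradigms/Solutions/02B/BricksGame.py | solution
-- ===== SOURCE A (Python) =====
-- def solution(n, arr):
--     """
--     Let's start simple: considering the base cases.
--     - When there is one brick left, we should obviously take the only brick left.
--     - When there are two bricks left, we should take both bricks.
--     - When there are three bricks left, we should take all three bricks.
--
--     The intresting part starts when there are 4 bricks left.
--
--     Suppose we are left with the bricks
--         [1, 2, 3, 4]
--     and it is our turn to make a move. What is our optimal play? Well, we can either take one brick, two bricks, or
--     three bricks.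
--         - If we take 1 brick, opponent is left with [2, 3, 4] which he will obviously take all of them. We score 1.
--         - If we take 2 bricks, opponent is left with [3, 4] which he will obviously take all of them. We score
--           1 + 2 = 3.
--         - If we take 3 bricks, opponent is left with [4] which he will obviously take. We score 1 + 2 + 3 = 6.
--
--     Let's analyse our thought process. What are we considering when we are making this argument?
--
--     For starters, we are assuming that the opponent is making optimal play. But optimal play is also what WE are
--     aiming for. Thus we can conclude that the opponent is using the SAME STRATEGY as we are.
--
--     Now let's finally introduce some DP terminology. Define the DP array as follows:
--         dp[-i] = (optimal score, number of bricks taken in this move)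
--     where `dp[-i]` represents that tuple in the case where there are `i` bricks left (hence the minus sign).
--
--     Back to our problem. Suppose we start with $k$ bricks remaining and we take one brick. What will our opponent's
--     move be? Or rather, what is the *state* that our opponent will be in? Well, if we take one brick, our opponent will
--     be left with $k - 1$ bricks, so the state is `dp[-(k-1)] = dp[-k + 1]`. Now our opponent's move will be
--     `dp[-k + 1][1]` (since the second value of the DP state is the number of bricks that we should take) and we'll be
--     left with `(k-1) - dp[-k + 1][1]` bricks. The state that WE need to play is now `dp[-((k-1) - dp[-k + 1][1])]`
--     which simplifies to `dp[-k + dp[-k + 1][1] + 1]`. The score we would attain in this case would thus be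
--         `dp[-k + dp[-k + 1][1] + 1][0] + arr[-k]`
--     where `arr` contains the bricks' scores.
--
--     Repeating the above argument for the other two types of moves (i.e. taking 2 bricks or taking 3 bricks) yields
--     the score in all three cases:
--         Taking 1 brick score:       dp[-k + dp[-k + 1][1] + 1][0] + arr[-k]
--         Taking 2 bricks' score:     dp[-k + dp[-k + 2][1] + 2][0] + arr[-k] + arr[-k + 1]
--         Taking 3 bricks' score:     dp[-k + dp[-k + 3][1] + 3][0] + arr[-k] + arr[-k + 1] + arr[-k + 2]
--     The optimal score for the state when we have `k` bricks left is thus the MAXIMUM of these three scores. The number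
--     of bricks taken naturally follows.
--     """
--
--     # Create the table
--     dp = [(0, 0) for _ in range(n + 1)]  # First element is the max score, second element is number of bricks to take
--
--     # Set base cases
--     dp[-1] = (arr[-1], 1)                      # When there is 1 brick left, it is optimal to just take that brick
--     dp[-2] = (arr[-1] + arr[-2], 2)            # When there are 2 bricks left, it is optimal to just take both bricks
--     dp[-3] = (arr[-1] + arr[-2] + arr[-3], 3)  # When there are 3 bricks left, it is optimal to just take the three bricks
--
--     # Process the rest of the cases
--     for bricks_left in range(4, n + 1):
--         # Consider all possible moves that we can take and the maximum score in each case
--         take1brick  = dp[-bricks_left + dp[-bricks_left + 1][1] + 1][0] + arr[-bricks_left]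
--         take2bricks = dp[-bricks_left + dp[-bricks_left + 2][1] + 2][0] + arr[-bricks_left] + arr[-(bricks_left - 1)]
--         take3bricks = dp[-bricks_left + dp[-bricks_left + 3][1] + 3][0] + arr[-bricks_left] + arr[-(bricks_left - 1)] + \
--                       arr[-(bricks_left - 2)]
--
--         # Determine the best option
--         options = [take1brick, take2bricks, take3bricks]
--         best_option = max(options)
--
--         # Update the DP table
--         dp[-bricks_left] = (best_option, options.index(best_option) + 1)  # 2nd element is the number of bricks taken
--
--     # Return the score for the initial case of having all the bricks
--     return dp[-n][0]
-- ===== SOURCE B (Python) =====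
-- def solution(n, arr):
--     # Backward scalar DP over suffix sums; dp[k] = score of the player to move with k bricks left.
--     a = arr[len(arr) - n:]  # the last n bricks, as A's negative indexing uses
--     suf = [0] * (n + 1)     # suf[i] = sum(a[i:])
--     for i in range(n - 1, -1, -1):
--         suf[i] = a[i] + suf[i + 1]
--     dp = [0] * (n + 1)
--     for k in range(1, n + 1):
--         if k <= 3:
--             dp[k] = suf[n - k]  # take-all base cases, as specified
--         else:
--             dp[k] = suf[n - k] - min(dp[k - 1], dp[k - 2], dp[k - 3])
--     return dp[n]
-- ===== Notes on version B (the rewrite author's own statement) =====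
-- stated objective: simpler
-- what changed: Replaces the (score, bricks-taken) pair table with negative-index move-chasing by a plain scalar backward DP over precomputed suffix sums: dp[k] = suffix_sum(k) - min(dp[k-1], dp[k-2], dp[k-3]) with take-all base cases for k <= 3, returning dp[n].
import Mathlib
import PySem

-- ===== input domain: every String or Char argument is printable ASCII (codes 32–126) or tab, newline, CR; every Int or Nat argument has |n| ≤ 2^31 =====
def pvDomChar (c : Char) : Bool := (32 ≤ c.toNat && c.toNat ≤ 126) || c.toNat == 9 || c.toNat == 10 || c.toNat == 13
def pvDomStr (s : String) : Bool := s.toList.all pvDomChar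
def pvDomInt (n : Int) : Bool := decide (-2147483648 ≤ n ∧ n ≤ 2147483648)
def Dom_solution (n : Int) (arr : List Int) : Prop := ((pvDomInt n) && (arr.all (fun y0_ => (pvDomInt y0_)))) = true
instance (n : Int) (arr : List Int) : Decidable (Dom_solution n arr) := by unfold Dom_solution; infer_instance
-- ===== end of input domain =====

-- B replaces A's (score, bricks-taken) pair table with a scalar suffix-sum DP; same O(n) cost, simpler.

-- ===== PORT A =====
-- Literal transliteration of A: dp is a list of (score, bricks-taken) pairs, written and read
-- with Python's negative indexing (pyGetD/pySetD are exact on in-range indices, which Pre_ ensures).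
def solution (n : Int) (arr : List Int) : Int :=
  -- dp = [(0, 0) for _ in range(n + 1)]
  let dp0 : List (Int × Int) := (PySem.List.pyRange 0 (n+1) 1).map (fun _ => ((0:Int),(0:Int)))
  -- base cases dp[-1], dp[-2], dp[-3]
  let dp1 := PySem.List.pySetD dp0 (-1) ((PySem.List.pyGetD arr (-1) 0, 1) : Int × Int)
  let dp2 := PySem.List.pySetD dp1 (-2)
      ((PySem.List.pyGetD arr (-1) 0 + PySem.List.pyGetD arr (-2) 0, 2) : Int × Int)
  let dp3 := PySem.List.pySetD dp2 (-3)
      ((PySem.List.pyGetD arr (-1) 0 + PySem.List.pyGetD arr (-2) 0 + PySem.List.pyGetD arr (-3) 0, 3) : Int × Int)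
  -- for bricks_left in range(4, n + 1): …
  let dpF := (PySem.List.pyRange 4 (n+1) 1).foldl (fun dp k =>
    let take1 := (PySem.List.pyGetD dp (-k + (PySem.List.pyGetD dp (-k+1) ((0:Int),(0:Int))).2 + 1) ((0:Int),(0:Int))).1
                 + PySem.List.pyGetD arr (-k) 0
    let take2 := (PySem.List.pyGetD dp (-k + (PySem.List.pyGetD dp (-k+2) ((0:Int),(0:Int))).2 + 2) ((0:Int),(0:Int))).1
                 + PySem.List.pyGetD arr (-k) 0 + PySem.List.pyGetD arr (-(k-1)) 0
    let take3 := (PySem.List.pyGetD dp (-k + (PySem.List.pyGetD dp (-k+3) ((0:Int),(0:Int))).2 + 3) ((0:Int),(0:Int))).1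
                 + PySem.List.pyGetD arr (-k) 0 + PySem.List.pyGetD arr (-(k-1)) 0 + PySem.List.pyGetD arr (-(k-2)) 0
    let options : List Int := [take1, take2, take3]
    let best := (PySem.List.max? options (fun x => x)).getD 0
    PySem.List.pySetD dp (-k) (best, ((PySem.List.index? options best).getD 0 : Nat) + 1)) dp3
  -- return dp[-n][0]
  (PySem.List.pyGetD dpF (-n) ((0:Int),(0:Int))).1

-- ===== PORT B =====
-- Literal transliteration of Source B: slice off the last n bricks, build suffix sums backward,
-- then a scalar DP dp[k] = suf[n-k] - min(dp[k-1], dp[k-2], dp[k-3]) with take-all base cases.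
def solution_alt (n : Int) (arr : List Int) : Int :=
  let a := PySem.List.slice arr (some ((arr.length : Int) - n)) none
  let suf := (PySem.List.pyRange (n-1) (-1) (-1)).foldl (fun suf i =>
      PySem.List.pySetD suf i (PySem.List.pyGetD a i 0 + PySem.List.pyGetD suf (i+1) 0))
    (List.replicate (n+1).toNat (0:Int))
  let dp := (PySem.List.pyRange 1 (n+1) 1).foldl (fun dp k =>
      if k ≤ 3 then PySem.List.pySetD dp k (PySem.List.pyGetD suf (n-k) 0)
      else PySem.List.pySetD dp k (PySem.List.pyGetD suf (n-k) 0 -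
             min (min (PySem.List.pyGetD dp (k-1) 0) (PySem.List.pyGetD dp (k-2) 0))
                 (PySem.List.pyGetD dp (k-3) 0)))
    (List.replicate (n+1).toNat (0:Int))
  PySem.List.pyGetD dp n 0

-- ===== PRECONDITION & SPEC =====
-- Pre_ excludes exactly the inputs where A raises IndexError: n < 2 (dp[-3] out of range),
-- arr shorter than 3 (arr[-3]) or shorter than n (arr[-bricks_left]).
def Pre_solution (n : Int) (arr : List Int) : Prop :=
  2 ≤ n ∧ n ≤ (arr.length : Int) ∧ 3 ≤ (arr.length : Int)
instance (n : Int) (arr : List Int) : Decidable (Pre_solution n arr) := by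
  unfold Pre_solution; infer_instance
def pvWitness_solution : Int × List Int := (4, [1, 2, 3, 4])
def Spec_solution (n : Int) (arr : List Int) (out : Int) : Prop := out = solution_alt n arr
instance (n : Int) (arr : List Int) (out : Int) : Decidable (Spec_solution n arr out) := by
  unfold Spec_solution; infer_instance

-- ===== CLAIM (what is proved, stated in full; the proofs are below) =====
def Claim_equal_solution : Prop := ∀ (n : Int) (arr : List Int), Dom_solution n arr →
  Pre_solution n arr → Spec_solution n arr (solution n arr)

-- ===== LEMMAS AND PROOFS =====

-- Python list[-k] write / read for an in-range negative index (exact: pySet?/pyGet? are some here).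
theorem pySetD_neg_idx {α : Type} (xs : List α) (v : α) (k : Nat) (h1 : 0 < k) (h2 : k ≤ xs.length) :
    PySem.List.pySetD xs (-(k:Int)) v = xs.set (xs.length - k) v := by
  unfold PySem.List.pySetD PySem.List.pySet? PySem.List.pyIdx?
  rw [if_neg (by omega), if_pos (by omega)]
  simp

theorem pyGetD_neg_idx {α : Type} (xs : List α) (d : α) (k : Nat) (h1 : 0 < k) (h2 : k ≤ xs.length) :
    PySem.List.pyGetD xs (-(k:Int)) d = xs.getD (xs.length - k) d := by
  simp [PySem.List.pyGetD, PySem.List.pyGet?_neg_natCast (xs := xs) (k := k) (by omega) (by omega),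
        List.getD_eq_getElem?_getD]

-- sum of the last k elements of a
def sufSum (a : List Int) (k : Nat) : Int := (a.drop (a.length - k)).sum

-- the common value: score of the player to move with k bricks left (A's base cases for k ≤ 3)
def Vv (a : List Int) (k : Nat) : Int :=
  if k ≤ 3 then sufSum a k
  else sufSum a k - min (min (Vv a (k-1)) (Vv a (k-2))) (Vv a (k-3))
termination_by k
decreasing_by all_goals omega

-- the number of bricks A's table records for state k
def Mv (a : List Int) (k : Nat) : Int :=
  if k ≤ 3 then (k : Int)
  else if Vv a (k-1) ≤ Vv a (k-2) ∧ Vv a (k-1) ≤ Vv a (k-3) then 1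
       else if Vv a (k-2) ≤ Vv a (k-3) then 2 else 3

theorem sufSum_zero (a : List Int) : sufSum a 0 = 0 := by simp [sufSum]

theorem sufSum_succ (a : List Int) (k : Nat) (h : k < a.length) :
    sufSum a (k+1) = a.getD (a.length - (k+1)) 0 + sufSum a k := by
  unfold sufSum
  rw [List.drop_eq_getElem_cons (by omega)]
  rw [List.getD_eq_getElem?_getD, List.getElem?_eq_getElem (by omega)]
  simp only [List.sum_cons, Option.getD_some]
  have h2 : a.length - (k+1) + 1 = a.length - k := by omega
  rw [h2]

theorem Mv_bounds (a : List Int) (k : Nat) (h : 1 ≤ k) :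
    1 ≤ Mv a k ∧ Mv a k ≤ (k:Int) ∧ Mv a k ≤ 3 := by
  unfold Mv
  split_ifs <;> simp_all <;> omega

-- the key identity behind A's index chasing: V(k - M k) = S k - V k
theorem Vv_key (a : List Int) (k : Nat) (h : 1 ≤ k) :
    Vv a (k - (Mv a k).toNat) = sufSum a k - Vv a k := by
  by_cases h3 : k ≤ 3
  · have hm : Mv a k = (k:Int) := by unfold Mv; rw [if_pos h3]
    have : k - (Mv a k).toNat = 0 := by omega
    rw [this, Vv, if_pos (by omega), sufSum_zero, Vv, if_pos h3]
    ring
  · have hk4 : 4 ≤ k := by omega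
    have hv : Vv a k = sufSum a k - min (min (Vv a (k-1)) (Vv a (k-2))) (Vv a (k-3)) := by
      rw [Vv, if_neg h3]
    unfold Mv
    rw [if_neg h3]
    split_ifs with h1 h2
    · have : k - ((1:Int)).toNat = k - 1 := by omega
      rw [this, hv]
      have : min (min (Vv a (k-1)) (Vv a (k-2))) (Vv a (k-3)) = Vv a (k-1) := by
        rcases h1 with ⟨ha, hb⟩; omega
      omega
    · have : k - ((2:Int)).toNat = k - 2 := by omega
      rw [this, hv]
      have : min (min (Vv a (k-1)) (Vv a (k-2))) (Vv a (k-3)) = Vv a (k-2) := by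
        simp only [not_and_or, not_le] at h1
        rcases h1 with ha | ha <;> omega
      omega
    · have : k - ((3:Int)).toNat = k - 3 := by omega
      rw [this, hv]
      have : min (min (Vv a (k-1)) (Vv a (k-2))) (Vv a (k-3)) = Vv a (k-3) := by
        simp only [not_and_or, not_le] at h1
        rcases h1 with ha | ha <;> omega
      omega

-- A's options-list bookkeeping: first max of [S - v1, S - v2, S - v3] and its index.
theorem opt3_max (S v1 v2 v3 : Int) :
    (PySem.List.max? [S - v1, S - v2, S - v3] (fun x => x)).getD 0 = S - min (min v1 v2) v3 := by
  rw [PySem.List.max?_id_cons]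
  simp [max_def, min_def]
  split_ifs <;> omega

theorem opt3_idx (S v1 v2 v3 : Int) :
    (((PySem.List.index? [S - v1, S - v2, S - v3] (S - min (min v1 v2) v3)).getD 0 : Nat) : Int) + 1
      = (if v1 ≤ v2 ∧ v1 ≤ v3 then 1 else if v2 ≤ v3 then 2 else 3) := by
  by_cases h1 : v1 ≤ v2 ∧ v1 ≤ v3
  · have hm : min (min v1 v2) v3 = v1 := by omega
    rw [hm, if_pos h1]
    simp only [PySem.List.index?_eq_idxOf?, List.idxOf?]
    rw [List.findIdx?_cons, if_pos (by simp)]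
    simp
  · have h1' : v2 < v1 ∨ v3 < v1 := by simp only [not_and_or, not_le] at h1; exact h1
    by_cases h2 : v2 ≤ v3
    · have hm : min (min v1 v2) v3 = v2 := by omega
      have hne : v2 < v1 := by omega
      rw [hm, if_neg h1, if_pos h2]
      simp only [PySem.List.index?_eq_idxOf?, List.idxOf?]
      rw [List.findIdx?_cons, if_neg (by simp; omega), List.findIdx?_cons, if_pos (by simp)]
      simp
    · have hm : min (min v1 v2) v3 = v3 := by omega
      have ha : v3 < v1 := by omega
      have hb : v3 < v2 := by omega
      rw [hm, if_neg h1, if_neg h2]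
      simp only [PySem.List.index?_eq_idxOf?, List.idxOf?]
      rw [List.findIdx?_cons, if_neg (by simp; omega), List.findIdx?_cons, if_neg (by simp; omega),
          List.findIdx?_cons, if_pos (by simp)]
      simp


theorem Vv_zero (a : List Int) : Vv a 0 = 0 := by rw [Vv]; simp [sufSum]

-- arr[-k] as a difference of suffix sums of a = arr.drop (arr.length - N)
theorem arr_read (arr : List Int) (N k : Nat) (hN : N ≤ arr.length) (h1 : 1 ≤ k) (h2 : k ≤ N) :
    PySem.List.pyGetD arr (-(k:Int)) 0
      = sufSum (arr.drop (arr.length - N)) k - sufSum (arr.drop (arr.length - N)) (k-1) := by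
  have hlen : (arr.drop (arr.length - N)).length = N := by simp; omega
  have hs := sufSum_succ (arr.drop (arr.length - N)) (k-1) (by omega)
  rw [show (k-1)+1 = k by omega] at hs
  rw [hs]
  have hget : (arr.drop (arr.length - N)).getD ((arr.drop (arr.length - N)).length - k) 0
      = arr.getD (arr.length - k) 0 := by
    rw [List.getD_eq_getElem?_getD, List.getD_eq_getElem?_getD, List.getElem?_drop, hlen,
        show arr.length - N + (N - k) = arr.length - k by omega]
  rw [hget, pyGetD_neg_idx arr 0 k (by omega) (by omega)]
  ring

-- ---------- A side ----------

-- the loop body of A's port, named for the proofs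
def Abody (arr : List Int) (dp : List (Int × Int)) (k : Int) : List (Int × Int) :=
  let take1 := (PySem.List.pyGetD dp (-k + (PySem.List.pyGetD dp (-k+1) ((0:Int),(0:Int))).2 + 1) ((0:Int),(0:Int))).1
               + PySem.List.pyGetD arr (-k) 0
  let take2 := (PySem.List.pyGetD dp (-k + (PySem.List.pyGetD dp (-k+2) ((0:Int),(0:Int))).2 + 2) ((0:Int),(0:Int))).1
               + PySem.List.pyGetD arr (-k) 0 + PySem.List.pyGetD arr (-(k-1)) 0
  let take3 := (PySem.List.pyGetD dp (-k + (PySem.List.pyGetD dp (-k+3) ((0:Int),(0:Int))).2 + 3) ((0:Int),(0:Int))).1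
               + PySem.List.pyGetD arr (-k) 0 + PySem.List.pyGetD arr (-(k-1)) 0 + PySem.List.pyGetD arr (-(k-2)) 0
  let options : List Int := [take1, take2, take3]
  let best := (PySem.List.max? options (fun x => x)).getD 0
  PySem.List.pySetD dp (-k) (best, ((PySem.List.index? options best).getD 0 : Nat) + 1)

-- A's dp after the three base-case writes
def Ainit (n : Int) (arr : List Int) : List (Int × Int) :=
  PySem.List.pySetD (PySem.List.pySetD (PySem.List.pySetD
      ((PySem.List.pyRange 0 (n+1) 1).map (fun _ => ((0:Int),(0:Int))))
      (-1) ((PySem.List.pyGetD arr (-1) 0, 1) : Int × Int))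
      (-2) ((PySem.List.pyGetD arr (-1) 0 + PySem.List.pyGetD arr (-2) 0, 2) : Int × Int))
      (-3) ((PySem.List.pyGetD arr (-1) 0 + PySem.List.pyGetD arr (-2) 0 + PySem.List.pyGetD arr (-3) 0, 3) : Int × Int)

theorem solution_eq_fold (n : Int) (arr : List Int) :
    solution n arr
      = (PySem.List.pyGetD ((PySem.List.pyRange 4 (n+1) 1).foldl (Abody arr) (Ainit n arr))
          (-n) ((0:Int),(0:Int))).1 := rfl

-- A's dp table after states 1..K have been filled (entry j holds state N+1-j)
def dpTab (a : List Int) (N K : Nat) : List (Int × Int) :=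
  (List.range (N+1)).map (fun j => if N+1-j ≤ K then (Vv a (N+1-j), Mv a (N+1-j)) else ((0:Int),(0:Int)))

theorem dpTab_len (a : List Int) (N K : Nat) : (dpTab a N K).length = N+1 := by simp [dpTab]

theorem dpTab_read_neg (a : List Int) (N K m : Nat) (h1 : 1 ≤ m) (h2 : m ≤ K) (h3 : m ≤ N) :
    PySem.List.pyGetD (dpTab a N K) (-(m:Int)) ((0:Int),(0:Int)) = (Vv a m, Mv a m) := by
  rw [pyGetD_neg_idx _ _ m (by omega) (by rw [dpTab_len]; omega), dpTab_len]
  rw [List.getD_eq_getElem?_getD]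
  rw [List.getElem?_eq_getElem (by simp [dpTab]; omega)]
  simp only [dpTab, List.getElem_map, List.getElem_range, Option.getD_some]
  rw [if_pos (by omega)]
  congr 1 <;> · congr 1; omega

theorem dpTab_read_zero (a : List Int) (N K : Nat) (hK : K ≤ N) :
    PySem.List.pyGetD (dpTab a N K) 0 ((0:Int),(0:Int)) = ((0:Int),(0:Int)) := by
  have h0 : PySem.List.pyGetD (dpTab a N K) 0 ((0:Int),(0:Int))
      = (dpTab a N K).getD 0 ((0:Int),(0:Int)) := by
    exact_mod_cast PySem.List.pyGetD_natCast (xs := dpTab a N K) (n := 0) (d := ((0:Int),(0:Int)))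
  rw [h0, List.getD_eq_getElem?_getD, List.getElem?_eq_getElem (by simp [dpTab])]
  simp only [dpTab, List.getElem_map, List.getElem_range, Option.getD_some]
  rw [if_neg (by omega)]

theorem dpTab_set (a : List Int) (N K k : Nat) (hk : k = K+1) (h2 : k ≤ N) :
    PySem.List.pySetD (dpTab a N K) (-(k:Int)) (Vv a k, Mv a k) = dpTab a N k := by
  rw [pySetD_neg_idx _ _ k (by omega) (by rw [dpTab_len]; omega), dpTab_len]
  apply List.ext_getElem
  · simp [dpTab]
  · intro j hj1 hj2
    rw [List.getElem_set]
    simp only [dpTab, List.getElem_map, List.getElem_range]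
    by_cases hjk : N+1-k = j
    · rw [if_pos hjk, if_pos (by omega)]
      have : N+1-j = k := by omega
      rw [this]
    · rw [if_neg hjk]
      by_cases hle : N+1-j ≤ K
      · rw [if_pos hle, if_pos (by omega)]
      · rw [if_neg hle, if_neg (by simp [dpTab] at hj1; omega)]

theorem dpTab_chase (a : List Int) (N K m : Nat) (h1 : 1 ≤ m) (h2 : m ≤ K) (h3 : K ≤ N) :
    (PySem.List.pyGetD (dpTab a N K) (-((m:Nat):Int) + Mv a m) ((0:Int),(0:Int))).1
      = sufSum a m - Vv a m := by
  obtain ⟨hb1, hb2, hb3⟩ := Mv_bounds a m h1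
  have hkey := Vv_key a m h1
  set r : Nat := m - (Mv a m).toNat with hr
  have hidx : -((m:Nat):Int) + Mv a m = -((r:Nat):Int) := by omega
  rw [hidx]
  by_cases hr0 : r = 0
  · rw [hr0] at hkey ⊢
    rw [show -(((0:Nat)):Int) = (0:Int) by simp, dpTab_read_zero a N K h3]
    rw [← hkey, Vv_zero]
  · rw [dpTab_read_neg a N K r (by omega) (by omega) (by omega)]
    exact hkey

theorem Ainit_eq (arr : List Int) (N : Nat) (h3 : 3 ≤ N) (hlen : N ≤ arr.length) :
    Ainit ((N:Nat):Int) arr = dpTab (arr.drop (arr.length - N)) N 3 := by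
  set a := arr.drop (arr.length - N) with ha
  have ha0 := sufSum_zero a
  have ar1 := arr_read arr N 1 hlen (by omega) (by omega)
  have ar2 := arr_read arr N 2 hlen (by omega) (by omega)
  have ar3 := arr_read arr N 3 hlen (by omega) (by omega)
  rw [← ha] at ar1 ar2 ar3
  have hdp0 : ((PySem.List.pyRange 0 (((N:Nat):Int)+1) 1).map (fun _ => ((0:Int),(0:Int))))
      = dpTab a N 0 := by
    apply List.ext_getElem
    · simp [dpTab, PySem.List.length_pyRange_one]
    · intro j hj1 hj2
      simp only [List.getElem_map, dpTab, List.getElem_range]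
      simp only [dpTab, List.length_map, List.length_range] at hj2
      rw [if_neg (by omega)]
  have hv1 : ((PySem.List.pyGetD arr (-1) 0, 1) : Int × Int) = (Vv a 1, Mv a 1) := by
    rw [show (-1:Int) = -((1:Nat):Int) by norm_num] at *
    rw [ar1, Vv, if_pos (by omega), Mv, if_pos (by omega)]
    rw [ha0]
    norm_num
  have hv2 : ((PySem.List.pyGetD arr (-1) 0 + PySem.List.pyGetD arr (-2) 0, 2) : Int × Int)
      = (Vv a 2, Mv a 2) := by
    rw [show (-1:Int) = -((1:Nat):Int) by norm_num, show (-2:Int) = -((2:Nat):Int) by norm_num] at *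
    rw [ar1, ar2, Vv, if_pos (by omega), Mv, if_pos (by omega)]
    rw [ha0]
    norm_num
  have hv3 : ((PySem.List.pyGetD arr (-1) 0 + PySem.List.pyGetD arr (-2) 0
        + PySem.List.pyGetD arr (-3) 0, 3) : Int × Int) = (Vv a 3, Mv a 3) := by
    rw [show (-1:Int) = -((1:Nat):Int) by norm_num, show (-2:Int) = -((2:Nat):Int) by norm_num,
        show (-3:Int) = -((3:Nat):Int) by norm_num] at *
    rw [ar1, ar2, ar3, Vv, if_pos (by omega), Mv, if_pos (by omega)]
    rw [ha0]
    norm_num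
  unfold Ainit
  rw [hdp0, hv1, hv2, hv3]
  rw [show (-1:Int) = -((1:Nat):Int) by norm_num, show (-2:Int) = -((2:Nat):Int) by norm_num,
      show (-3:Int) = -((3:Nat):Int) by norm_num]
  rw [dpTab_set a N 0 1 rfl (by omega), dpTab_set a N 1 2 rfl (by omega),
      dpTab_set a N 2 3 rfl (by omega)]

theorem A_step (arr : List Int) (N K : Nat) (h4 : 3 ≤ K) (hKN : K+1 ≤ N) (hlen : N ≤ arr.length) :
    Abody arr (dpTab (arr.drop (arr.length - N)) N K) (((K:Nat):Int)+1)
      = dpTab (arr.drop (arr.length - N)) N (K+1) := by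
  set a := arr.drop (arr.length - N) with ha
  -- index arithmetic
  have e1 : -(((K:Nat):Int)+1) + 1 = -((K:Nat):Int) := by ring
  have e2 : -(((K:Nat):Int)+1) + 2 = -(((K-1:Nat)):Int) := by push_cast [Nat.cast_sub (by omega : 1 ≤ K)]; ring
  have e3 : -(((K:Nat):Int)+1) + 3 = -(((K-2:Nat)):Int) := by push_cast [Nat.cast_sub (by omega : 2 ≤ K)]; ring
  have e4 : -((((K:Nat):Int)+1) - 1) = -((K:Nat):Int) := by ring
  have e5 : -((((K:Nat):Int)+1) - 2) = -(((K-1:Nat)):Int) := by push_cast [Nat.cast_sub (by omega : 1 ≤ K)]; ring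
  have e6 : -(((K:Nat):Int)+1) = -(((K+1:Nat)):Int) := by push_cast; ring
  -- first-level table reads
  have g1 := dpTab_read_neg a N K K (by omega) (by omega) (by omega)
  have g2 := dpTab_read_neg a N K (K-1) (by omega) (by omega) (by omega)
  have g3 := dpTab_read_neg a N K (K-2) (by omega) (by omega) (by omega)
  -- chased second-level reads
  have c1 : -(((K:Nat):Int)+1) + Mv a K + 1 = -((K:Nat):Int) + Mv a K := by ring
  have c2 : -(((K:Nat):Int)+1) + Mv a (K-1) + 2 = -(((K-1:Nat)):Int) + Mv a (K-1) := by
    push_cast [Nat.cast_sub (by omega : 1 ≤ K)]; ring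
  have c3 : -(((K:Nat):Int)+1) + Mv a (K-2) + 3 = -(((K-2:Nat)):Int) + Mv a (K-2) := by
    push_cast [Nat.cast_sub (by omega : 2 ≤ K)]; ring
  have ch1 := dpTab_chase a N K K (by omega) (by omega) (by omega)
  have ch2 := dpTab_chase a N K (K-1) (by omega) (by omega) (by omega)
  have ch3 := dpTab_chase a N K (K-2) (by omega) (by omega) (by omega)
  -- brick reads
  have ar1 := arr_read arr N (K+1) hlen (by omega) (by omega)
  have ar2 := arr_read arr N K hlen (by omega) (by omega)
  have ar3 := arr_read arr N (K-1) hlen (by omega) (by omega)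
  rw [← ha] at ar1 ar2 ar3
  rw [show (K+1)-1 = K from rfl] at ar1
  rw [show (K-1)-1 = K-2 by omega] at ar3
  have ar2' := ar2
  rw [show K-1 = K-1 from rfl] at ar2'
  have e7 : -(((K+1:Nat)):Int) = -(((K:Nat):Int)+1) := by push_cast; ring
  rw [e7] at ar1
  unfold Abody
  simp only [e1, e2, e3]
  simp only [g1, g2, g3]
  simp only [c1, c2, c3]
  simp only [ch1, ch2, ch3]
  simp only [e4, e5]
  simp only [ar1, ar2, ar3]
  have t1 : sufSum a K - Vv a K + (sufSum a (K+1) - sufSum a K)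
      = sufSum a (K+1) - Vv a K := by ring
  have t2 : sufSum a (K-1) - Vv a (K-1) + (sufSum a (K+1) - sufSum a K)
        + (sufSum a K - sufSum a (K-1)) = sufSum a (K+1) - Vv a (K-1) := by ring
  have t3 : sufSum a (K-2) - Vv a (K-2) + (sufSum a (K+1) - sufSum a K)
        + (sufSum a K - sufSum a (K-1)) + (sufSum a (K-1) - sufSum a (K-2))
      = sufSum a (K+1) - Vv a (K-2) := by ring
  rw [t1, t2, t3]
  rw [opt3_max (sufSum a (K+1)) (Vv a K) (Vv a (K-1)) (Vv a (K-2))]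
  rw [opt3_idx (sufSum a (K+1)) (Vv a K) (Vv a (K-1)) (Vv a (K-2))]
  have hvK : sufSum a (K+1) - min (min (Vv a K) (Vv a (K-1))) (Vv a (K-2)) = Vv a (K+1) := by
    have hVv : Vv a (K+1) = sufSum a (K+1)
        - min (min (Vv a (K+1-1)) (Vv a (K+1-2))) (Vv a (K+1-3)) := by
      rw [Vv, if_neg (by omega)]
    rw [hVv, show K+1-1 = K from rfl, show K+1-2 = K-1 by omega, show K+1-3 = K-2 by omega]
  have hmK : Mv a (K+1) = (if Vv a K ≤ Vv a (K-1) ∧ Vv a K ≤ Vv a (K-2) then (1:Int)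
        else if Vv a (K-1) ≤ Vv a (K-2) then 2 else 3) := by
    rw [Mv, if_neg (show ¬(K+1 ≤ 3) by omega)]
    rw [show K+1-1 = K from rfl, show K+1-2 = K-1 by omega, show K+1-3 = K-2 by omega]
  rw [hvK, ← hmK, e6]
  exact dpTab_set a N K (K+1) rfl hKN

theorem A_fold (arr : List Int) (N K : Nat) (h3 : 3 ≤ K) (hKN : K ≤ N) (hlen : N ≤ arr.length) :
    (PySem.List.pyRange 4 ((K:Int)+1) 1).foldl (Abody arr) (dpTab (arr.drop (arr.length - N)) N 3)
      = dpTab (arr.drop (arr.length - N)) N K := by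
  induction K, h3 using Nat.le_induction with
  | base =>
    rw [PySem.List.pyRange_one_eq_nil (by omega)]
    rfl
  | succ K hK ih =>
    have hr : PySem.List.pyRange 4 (((K+1:Nat):Int)+1) 1
        = PySem.List.pyRange 4 ((K:Int)+1) 1 ++ [((K:Int)+1)] := by
      have h := PySem.List.pyRange_one_succ_right (a := 4) (b := (K:Int)+1) (by omega)
      rw [show (((K+1:Nat):Int)+1) = ((K:Int)+1)+1 by push_cast; ring]
      exact h
    rw [hr, List.foldl_append, ih (by omega)]
    simp only [List.foldl_cons, List.foldl_nil]
    exact A_step arr N K hK (by omega) hlen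

theorem A_eq_V (arr : List Int) (N : Nat) (h3 : 3 ≤ N) (hlen : N ≤ arr.length) :
    solution ((N:Nat):Int) arr = Vv (arr.drop (arr.length - N)) N := by
  rw [solution_eq_fold, Ainit_eq arr N h3 hlen]
  have : PySem.List.pyRange 4 (((N:Nat):Int)+1) 1 = PySem.List.pyRange 4 ((N:Int)+1) 1 := rfl
  rw [this, A_fold arr N N h3 (le_refl N) hlen]
  rw [dpTab_read_neg _ N N N (by omega) (by omega) (by omega)]

theorem A_eq_V_two (arr : List Int) (hlen : 3 ≤ arr.length) :
    solution 2 arr = Vv (arr.drop (arr.length - 2)) 2 := by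
  have hL : solution 2 arr = PySem.List.pyGetD arr (-1) 0 + PySem.List.pyGetD arr (-2) 0 := rfl
  have ar1 := arr_read arr 2 1 (by omega) (by omega) (by omega)
  have ar2 := arr_read arr 2 2 (by omega) (by omega) (by omega)
  rw [show (-((1:Nat):Int)) = (-1:Int) by norm_num] at ar1
  rw [show (-((2:Nat):Int)) = (-2:Int) by norm_num] at ar2
  rw [show (2:Nat)-1 = 1 from rfl] at ar2
  rw [show (1:Nat)-1 = 0 from rfl] at ar1
  rw [hL, ar1, ar2, Vv, if_pos (by omega), sufSum_zero]
  ring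

-- ---------- B side ----------

def Bbody1 (a : List Int) (suf : List Int) (i : Int) : List Int :=
  PySem.List.pySetD suf i (PySem.List.pyGetD a i 0 + PySem.List.pyGetD suf (i+1) 0)

def Bbody2 (n : Int) (suf : List Int) (dp : List Int) (k : Int) : List Int :=
  if k ≤ 3 then PySem.List.pySetD dp k (PySem.List.pyGetD suf (n-k) 0)
  else PySem.List.pySetD dp k (PySem.List.pyGetD suf (n-k) 0 -
         min (min (PySem.List.pyGetD dp (k-1) 0) (PySem.List.pyGetD dp (k-2) 0))
             (PySem.List.pyGetD dp (k-3) 0))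

theorem solution_alt_eq_fold (n : Int) (arr : List Int) :
    solution_alt n arr =
      (let a := PySem.List.slice arr (some ((arr.length : Int) - n)) none
       let suf := (PySem.List.pyRange (n-1) (-1) (-1)).foldl (Bbody1 a) (List.replicate (n+1).toNat (0:Int))
       PySem.List.pyGetD ((PySem.List.pyRange 1 (n+1) 1).foldl (Bbody2 n suf) (List.replicate (n+1).toNat (0:Int))) n 0) := rfl

def sufTab (a : List Int) (N I : Nat) : List Int :=
  (List.range (N+1)).map (fun j => if I ≤ j then sufSum a (N-j) else 0)

theorem sufTab_init (a : List Int) (N : Nat) : List.replicate (N+1) (0:Int) = sufTab a N N := by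
  apply List.ext_getElem
  · simp [sufTab]
  · intro j hj1 hj2
    simp only [List.getElem_replicate, sufTab, List.getElem_map, List.getElem_range]
    simp only [sufTab, List.length_map, List.length_range] at hj2
    by_cases h : N ≤ j
    · rw [if_pos h, show N-j = 0 by omega, sufSum_zero]
    · rw [if_neg h]

theorem sufTab_read (a : List Int) (N I j : Nat) (hI : I ≤ j) (hj : j ≤ N) :
    PySem.List.pyGetD (sufTab a N I) ((j:Nat):Int) 0 = sufSum a (N-j) := by
  rw [PySem.List.pyGetD_natCast, List.getD_eq_getElem?_getD,
      List.getElem?_eq_getElem (by simp [sufTab]; omega)]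
  simp only [sufTab, List.getElem_map, List.getElem_range, Option.getD_some]
  rw [if_pos hI]

theorem suf_fold (a : List Int) (N : Nat) (hlen : a.length = N) :
    ∀ I, I ≤ N →
    (PySem.List.pyRange ((I:Int)-1) (-1) (-1)).foldl (Bbody1 a) (sufTab a N I) = sufTab a N 0 := by
  intro I
  induction I with
  | zero =>
    intro _
    rw [show ((0:Nat):Int)-1 = (-1:Int) by ring, PySem.List.pyRange_neg_one_eq_nil (by omega)]
    rfl
  | succ I ih =>
    intro hIN
    have hr : PySem.List.pyRange (((I+1:Nat):Int)-1) (-1) (-1)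
        = (I:Int) :: PySem.List.pyRange ((I:Int)-1) (-1) (-1) := by
      push_cast
      rw [show (I:Int)+1-1 = (I:Int) by ring]
      exact PySem.List.pyRange_neg_one_cons (by omega)
    rw [hr, List.foldl_cons]
    have hstep : Bbody1 a (sufTab a N (I+1)) (I:Int) = sufTab a N I := by
      unfold Bbody1
      have hga : PySem.List.pyGetD a ((I:Nat):Int) 0 = a.getD I 0 := by
        rw [PySem.List.pyGetD_natCast, List.getD_eq_getElem?_getD]
      have hgs : PySem.List.pyGetD (sufTab a N (I+1)) ((I:Int)+1) 0 = sufSum a (N-(I+1)) := by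
        rw [show ((I:Int)+1) = (((I+1:Nat)):Int) by push_cast; ring]
        exact sufTab_read a N (I+1) (I+1) (le_refl _) (by omega)
      rw [hga, hgs]
      have hsum : a.getD I 0 + sufSum a (N-(I+1)) = sufSum a (N-I) := by
        have := sufSum_succ a (N-I-1) (by omega)
        rw [show (N-I-1)+1 = N-I by omega] at this
        rw [show a.length - (N-I) = I by omega] at this
        rw [show N-(I+1) = N-I-1 by omega]
        omega
      rw [hsum]
      rw [PySem.List.pySetD_natCast]
      apply List.ext_getElem
      · simp [sufTab]
      · intro j hj1 hj2
        rw [List.getElem_set]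
        simp only [sufTab, List.getElem_map, List.getElem_range]
        simp only [sufTab] at hj1
        by_cases hji : I = j
        · rw [if_pos hji, if_pos (by omega)]
          rw [← hji]
        · rw [if_neg hji]
          by_cases hle : I+1 ≤ j
          · rw [if_pos hle, if_pos (by omega)]
          · rw [if_neg hle, if_neg (by omega)]
    rw [hstep]
    exact ih (by omega)

def dpBTab (a : List Int) (N K : Nat) : List Int :=
  (List.range (N+1)).map (fun j => if 1 ≤ j ∧ j ≤ K then Vv a j else 0)

theorem dpBTab_init (a : List Int) (N : Nat) : List.replicate (N+1) (0:Int) = dpBTab a N 0 := by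
  apply List.ext_getElem
  · simp [dpBTab]
  · intro j hj1 hj2
    simp only [List.getElem_replicate, dpBTab, List.getElem_map, List.getElem_range]
    rw [if_neg (by omega)]

theorem dpBTab_read (a : List Int) (N K j : Nat) (h1 : 1 ≤ j) (h2 : j ≤ K) (h3 : j ≤ N) :
    PySem.List.pyGetD (dpBTab a N K) ((j:Nat):Int) 0 = Vv a j := by
  rw [PySem.List.pyGetD_natCast, List.getD_eq_getElem?_getD,
      List.getElem?_eq_getElem (by simp [dpBTab]; omega)]
  simp only [dpBTab, List.getElem_map, List.getElem_range, Option.getD_some]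
  rw [if_pos ⟨h1, h2⟩]

theorem dpBTab_set (a : List Int) (N K k : Nat) (hk : k = K+1) (_h2 : k ≤ N) :
    PySem.List.pySetD (dpBTab a N K) ((k:Nat):Int) (Vv a k) = dpBTab a N k := by
  rw [PySem.List.pySetD_natCast]
  apply List.ext_getElem
  · simp [dpBTab]
  · intro j hj1 hj2
    rw [List.getElem_set]
    simp only [dpBTab, List.getElem_map, List.getElem_range]
    simp only [dpBTab] at hj1
    by_cases hjk : k = j
    · rw [if_pos hjk, if_pos (by omega)]
      rw [← hjk]
    · rw [if_neg hjk]
      by_cases hle : 1 ≤ j ∧ j ≤ K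
      · rw [if_pos hle, if_pos (by omega)]
      · rw [if_neg hle, if_neg (by omega)]

theorem B_step (a : List Int) (N K : Nat) (hKN : K+1 ≤ N) :
    Bbody2 ((N:Nat):Int) (sufTab a N 0) (dpBTab a N K) (((K:Nat):Int)+1) = dpBTab a N (K+1) := by
  unfold Bbody2
  have hsuf : PySem.List.pyGetD (sufTab a N 0) (((N:Nat):Int)-(((K:Nat):Int)+1)) 0 = sufSum a (K+1) := by
    rw [show ((N:Nat):Int)-(((K:Nat):Int)+1) = (((N-(K+1):Nat)):Int) by omega]
    rw [sufTab_read a N 0 (N-(K+1)) (by omega) (by omega)]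
    congr 1
    omega
  by_cases h3 : K+1 ≤ 3
  · rw [if_pos (show ((K:Nat):Int)+1 ≤ 3 by omega), hsuf,
        show sufSum a (K+1) = Vv a (K+1) by rw [Vv, if_pos h3]]
    exact dpBTab_set a N K (K+1) rfl (by omega)
  · rw [if_neg (show ¬(((K:Nat):Int)+1 ≤ 3) by omega), hsuf]
    have hr1 : PySem.List.pyGetD (dpBTab a N K) ((((K:Nat):Int)+1)-1) 0 = Vv a K := by
      rw [show (((K:Nat):Int)+1)-1 = ((K:Nat):Int) by ring]
      exact dpBTab_read a N K K (by omega) (le_refl _) (by omega)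
    have hr2 : PySem.List.pyGetD (dpBTab a N K) ((((K:Nat):Int)+1)-2) 0 = Vv a (K-1) := by
      rw [show (((K:Nat):Int)+1)-2 = (((K-1:Nat)):Int) by omega]
      exact dpBTab_read a N K (K-1) (by omega) (by omega) (by omega)
    have hr3 : PySem.List.pyGetD (dpBTab a N K) ((((K:Nat):Int)+1)-3) 0 = Vv a (K-2) := by
      rw [show (((K:Nat):Int)+1)-3 = (((K-2:Nat)):Int) by omega]
      exact dpBTab_read a N K (K-2) (by omega) (by omega) (by omega)
    rw [hr1, hr2, hr3]
    have hv : sufSum a (K+1) - min (min (Vv a K) (Vv a (K-1))) (Vv a (K-2)) = Vv a (K+1) := by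
      have hVv : Vv a (K+1) = sufSum a (K+1)
          - min (min (Vv a (K+1-1)) (Vv a (K+1-2))) (Vv a (K+1-3)) := by
        rw [Vv, if_neg h3]
      rw [hVv, show K+1-1 = K from rfl, show K+1-2 = K-1 by omega, show K+1-3 = K-2 by omega]
    rw [hv]
    exact dpBTab_set a N K (K+1) rfl (by omega)

theorem B_fold (a : List Int) (N : Nat) :
    ∀ K, K ≤ N →
    (PySem.List.pyRange 1 ((K:Int)+1) 1).foldl (Bbody2 ((N:Nat):Int) (sufTab a N 0)) (dpBTab a N 0)
      = dpBTab a N K := by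
  intro K
  induction K with
  | zero =>
    intro _
    rw [PySem.List.pyRange_one_eq_nil (by omega)]
    rfl
  | succ K ih =>
    intro hKN
    have hr : PySem.List.pyRange 1 (((K+1:Nat):Int)+1) 1
        = PySem.List.pyRange 1 ((K:Int)+1) 1 ++ [((K:Int)+1)] := by
      have h := PySem.List.pyRange_one_succ_right (a := 1) (b := (K:Int)+1) (by omega)
      rw [show (((K+1:Nat):Int)+1) = ((K:Int)+1)+1 by push_cast; ring]
      exact h
    rw [hr, List.foldl_append, ih (by omega)]
    simp only [List.foldl_cons, List.foldl_nil]
    exact B_step a N K (by omega)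

theorem B_eq_V (arr : List Int) (N : Nat) (h1 : 1 ≤ N) (hlen : N ≤ arr.length) :
    solution_alt ((N:Nat):Int) arr = Vv (arr.drop (arr.length - N)) N := by
  rw [solution_alt_eq_fold]
  set a := arr.drop (arr.length - N) with ha
  have hslice : PySem.List.slice arr (some ((arr.length : Int) - ((N:Nat):Int))) none = a := by
    rw [PySem.List.slice_from]
    · rw [ha]
      congr 1
      omega
    · omega
  have halen : a.length = N := by simp [ha]; omega
  simp only [hslice]
  have hrepl : (((N:Nat):Int)+1).toNat = N+1 := by omega
  rw [hrepl]
  rw [sufTab_init a N, suf_fold a N halen N (le_refl N), ← sufTab_init a N, dpBTab_init a N]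
  rw [B_fold a N N (le_refl N)]
  exact dpBTab_read a N N N h1 (le_refl N) (le_refl N)

-- ===== VERDICT (by name: the statement is the Claim_ definition above) =====
theorem solution_spec : Claim_equal_solution := by
  intro n arr _ hpre
  obtain ⟨h2, hn, h3⟩ := hpre
  unfold Spec_solution
  have hN : n = ((n.toNat:Nat):Int) := by omega
  set N := n.toNat with hNd
  have hNlen : N ≤ arr.length := by omega
  by_cases h3N : 3 ≤ N
  · rw [hN, A_eq_V arr N h3N hNlen, B_eq_V arr N (by omega) hNlen]
  · have hN2 : N = 2 := by omega
    rw [hN, hN2, show (((2:Nat)):Int) = (2:Int) by norm_num, A_eq_V_two arr (by omega)]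
    have := B_eq_V arr 2 (by omega) (by omega)
    rw [show (((2:Nat)):Int) = (2:Int) by norm_num] at this
    rw [this]
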